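-- pv_equiv track=rewrite | github.com/WISOWS/bybit-bot-repository | research_search_intraday.py | latest_idx
-- ===== SOURCE A (Python) =====
-- from typing import Any, Dict, List, Optional, Tuple
--
-- def latest_idx(times: List[int], timestamp_ms: int) -> int:
--     lo = 0
--     hi = len(times)
--     while lo < hi:
--         mid = (lo + hi) // 2
--         if times[mid] <= timestamp_ms:
--             lo = mid + 1
--         else:
--             hi = mid
--     return lo - 1
-- ===== SOURCE B (Python) =====
-- def latest_idx(times, timestamp_ms):
--     # Divide-and-conquer on (base, n): base offset plus remaining window size,
--     # probing the same midpoints as a lo/hi binary search would.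
--     def go(base, n):
--         if n == 0:
--             return base - 1
--         half = n // 2
--         if times[base + half] <= timestamp_ms:
--             return go(base + half + 1, n - half - 1)
--         return go(base, half)
--     return go(0, len(times))
-- ===== Notes on version B (the rewrite author's own statement) =====
-- stated objective: alternative
-- what changed: Replaces the imperative lo/hi while-loop with a recursive divide-and-conquer helper over (base offset, window size), probing the same midpoints.
import Mathlib
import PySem

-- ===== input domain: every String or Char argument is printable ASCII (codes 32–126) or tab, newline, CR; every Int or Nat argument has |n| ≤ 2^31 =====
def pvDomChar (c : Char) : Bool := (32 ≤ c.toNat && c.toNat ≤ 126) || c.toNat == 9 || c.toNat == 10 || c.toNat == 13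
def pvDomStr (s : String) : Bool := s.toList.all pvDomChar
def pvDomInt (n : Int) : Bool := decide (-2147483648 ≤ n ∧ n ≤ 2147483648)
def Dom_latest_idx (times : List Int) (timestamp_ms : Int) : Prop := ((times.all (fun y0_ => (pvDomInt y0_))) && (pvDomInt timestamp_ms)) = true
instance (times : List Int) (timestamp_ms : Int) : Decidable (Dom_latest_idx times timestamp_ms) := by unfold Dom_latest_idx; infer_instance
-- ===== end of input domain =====

-- B replaces A's imperative lo/hi while-loop by a recursive divide-and-conquer
-- helper over (base offset, window size) probing the same midpoints (objective: alternative).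


-- ===== PORT A =====
-- the while-loop, as well-founded recursion on the window (hi - lo);
-- times[mid] is always in range when lo < hi ≤ len, so .getD 0 is unreachable
def latest_idx_loop (times : List Int) (timestamp_ms : Int) (lo hi : Int) : Int :=
  if _h : lo < hi then
    let mid := PySem.Int.floordiv (lo + hi) 2
    if (PySem.List.pyGet? times mid).getD 0 ≤ timestamp_ms then
      latest_idx_loop times timestamp_ms (mid + 1) hi
    else
      latest_idx_loop times timestamp_ms lo mid
  else
    lo - 1
termination_by (hi - lo).toNat
decreasing_by
  · simp only [PySem.Int.floordiv, Int.fdiv_eq_ediv] at *; omega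
  · simp only [PySem.Int.floordiv, Int.fdiv_eq_ediv] at *; omega

def latest_idx (times : List Int) (timestamp_ms : Int) : Int :=
  latest_idx_loop times timestamp_ms 0 (times.length : Int)

-- ===== PORT B =====
-- go(base, n): n is a count, always nonnegative in Source B, so it is a Nat here;
-- Nat division n / 2 is exactly Python's n // 2 for nonnegative n
def latest_idx_go (times : List Int) (timestamp_ms : Int) (base : Int) (n : Nat) : Int :=
  if _h : n = 0 then
    base - 1
  else
    let half := n / 2
    if (PySem.List.pyGet? times (base + (half : Int))).getD 0 ≤ timestamp_ms then
      latest_idx_go times timestamp_ms (base + (half : Int) + 1) (n - half - 1)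
    else
      latest_idx_go times timestamp_ms base half
termination_by n
decreasing_by
  · omega
  · exact Nat.div_lt_self (Nat.pos_of_ne_zero _h) (by norm_num)

def latest_idx_alt (times : List Int) (timestamp_ms : Int) : Int :=
  latest_idx_go times timestamp_ms 0 times.length

-- ===== PRECONDITION & SPEC =====
def Spec_latest_idx (times : List Int) (timestamp_ms : Int) (out : Int) : Prop := out = latest_idx_alt times timestamp_ms
instance (times : List Int) (timestamp_ms : Int) (out : Int) : Decidable (Spec_latest_idx times timestamp_ms out) := by unfold Spec_latest_idx; infer_instance

-- ===== CLAIM (what is proved, stated in full; the proofs are below) =====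
def Claim_equal_latest_idx : Prop := ∀ (times : List Int) (timestamp_ms : Int), Dom_latest_idx times timestamp_ms → Spec_latest_idx times timestamp_ms (latest_idx times timestamp_ms)

-- ===== LEMMAS AND PROOFS =====

-- the loop on window [lo, lo+n) equals go(lo, n), for any lo ≥ 0
lemma latest_idx_loop_eq_go (times : List Int) (t : Int) :
    ∀ n : Nat, ∀ lo : Int, 0 ≤ lo →
      latest_idx_loop times t lo (lo + (n : Int)) = latest_idx_go times t lo n := by
  intro n
  induction n using Nat.strong_induction_on with
  | _ n ih =>
    intro lo hlo
    rw [latest_idx_loop, latest_idx_go]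
    by_cases hn : n = 0
    · subst hn; simp
    · have hlt : lo < lo + (n : Int) := by omega
      have hmid : PySem.Int.floordiv (lo + (lo + (n : Int))) 2 = lo + ((n / 2 : Nat) : Int) := by
        simp only [PySem.Int.floordiv, Int.fdiv_eq_ediv]
        omega
      simp only [hmid, dif_pos hlt, dif_neg hn]
      have hhalf : n / 2 < n := Nat.div_lt_self (Nat.pos_of_ne_zero hn) (by norm_num)
      split
      · have := ih (n - n / 2 - 1) (by omega) (lo + ((n / 2 : Nat) : Int) + 1) (by omega)
        have harg : lo + ((n / 2 : Nat) : Int) + 1 + ((n - n / 2 - 1 : Nat) : Int)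
            = lo + (n : Int) := by omega
        rw [← harg, this]
      · exact ih (n / 2) hhalf lo hlo

-- ===== VERDICT (by name: the statement is the Claim_ definition above) =====
theorem latest_idx_spec : Claim_equal_latest_idx := by
  intro times t _
  unfold Spec_latest_idx latest_idx latest_idx_alt
  simpa using latest_idx_loop_eq_go times t times.length 0 le_rfl
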